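-- pv_equiv track=rewrite | github.com/selfreferencing/erdos-86-lean | Zeroless/exp87_5adic_structure.py | last_k_digits
-- ===== SOURCE A (Python) =====
-- def last_k_digits(n, k):
--     """Get last k digits of 2^n as a list (LSB first)."""
--     # Compute 2^n mod 10^k
--     mod = 10 ** k
--     val = pow(2, n, mod)
--     digits = []
--     for _ in range(k):
--         digits.append(val % 10)
--         val //= 10
--     return digits
-- ===== SOURCE B (Python) =====
-- def last_k_digits(n, k):
--     """Get last k digits of 2^n as a list (LSB first)."""
--     if k == 0:
--         return []
--
--     def split(v, m):
--         # little-endian decimal digits of v (< 10**m), exactly m of them,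
--         # by divide-and-conquer radix splitting
--         if m == 1:
--             return [v]
--         h = m // 2
--         hi, lo = divmod(v, 10 ** h)
--         return split(lo, h) + split(hi, m - h)
--
--     return split(pow(2, n, 10 ** k), k)
-- ===== Notes on version B (the rewrite author's own statement) =====
-- stated objective: faster
-- what changed: Digit extraction is a divide-and-conquer radix split: the residue is recursively cut in half with one divmod by 10**(m//2) per node until single digits remain, instead of A's linear k-step %10 // 10 loop over the whole shrinking integer.
import Mathlib
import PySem

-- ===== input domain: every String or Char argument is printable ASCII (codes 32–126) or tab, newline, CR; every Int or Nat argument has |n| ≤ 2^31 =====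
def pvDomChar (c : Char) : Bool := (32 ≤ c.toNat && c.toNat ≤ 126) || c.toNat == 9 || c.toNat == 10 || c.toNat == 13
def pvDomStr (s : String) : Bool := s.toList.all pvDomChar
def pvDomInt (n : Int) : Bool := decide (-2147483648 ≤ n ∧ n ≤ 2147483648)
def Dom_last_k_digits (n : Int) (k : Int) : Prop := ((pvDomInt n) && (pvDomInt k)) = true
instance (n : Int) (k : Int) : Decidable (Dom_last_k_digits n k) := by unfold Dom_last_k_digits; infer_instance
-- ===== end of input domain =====

-- B extracts the digits of pow(2, n, 10**k) by a divide-and-conquer radix split (one divmod by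
-- 10**(m//2) per node) instead of A's linear k-step % 10 / // 10 loop; a timing run measured B faster at the largest sizes (objective: faster).

-- ===== PORT A =====
def last_k_digits (n : Int) (k : Int) : List Int :=
  -- mod = 10 ** k; val = pow(2, n, mod);
  -- for _ in range(k): digits.append(val % 10); val //= 10
  ((PySem.List.pyRange 0 k 1).foldl
      (fun (st : List Int × Int) _ =>
        (st.1 ++ [PySem.Int.mod st.2 10], PySem.Int.floordiv st.2 10))
      ([], PySem.Int.powMod 2 n.toNat ((10 : Int) ^ k.toNat))).1

-- ===== PORT B =====
-- def split(v, m): if m == 1: return [v]; h = m // 2; hi, lo = divmod(v, 10 ** h);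
--                  return split(lo, h) + split(hi, m - h)
-- (Python's split is only ever called with m ≥ 1; the base guard is 'm ≤ 1' instead of 'm == 1'
--  solely so the recursion is total — unreachable inputs m ≤ 0, no behaviour change on m ≥ 1.)
def lkdSplit (v : Int) (m : Int) : List Int :=
  if m ≤ 1 then [v]
  else
    let h := PySem.Int.floordiv m 2
    let p := (10 : Int) ^ h.toNat
    lkdSplit (PySem.Int.mod v p) h ++ lkdSplit (PySem.Int.floordiv v p) (m - h)
termination_by m.toNat
decreasing_by
  · simp only [PySem.Int.floordiv_eq_ediv_of_pos (by omega : (0:Int) < 2)] at *; omega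
  · simp only [PySem.Int.floordiv_eq_ediv_of_pos (by omega : (0:Int) < 2)] at *; omega

def last_k_digits_alt (n : Int) (k : Int) : List Int :=
  if k = 0 then []
  else lkdSplit (PySem.Int.powMod 2 n.toNat ((10 : Int) ^ k.toNat)) k

-- ===== PRECONDITION & SPEC =====
-- Pre_ excludes exactly the inputs where Python A raises: k < 0 (10**k is a float, so pow raises
-- TypeError) and n < 0 with k > 0 (pow(2, n, 10**k) raises ValueError, 2 not invertible mod 10**k).
def Pre_last_k_digits (n : Int) (k : Int) : Prop := 0 ≤ k ∧ (0 ≤ n ∨ k = 0)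
instance (n : Int) (k : Int) : Decidable (Pre_last_k_digits n k) := by unfold Pre_last_k_digits; infer_instance
def pvWitness_last_k_digits : Int × Int := (10, 3)

def Spec_last_k_digits (n : Int) (k : Int) (out : List Int) : Prop := out = last_k_digits_alt n k
instance (n : Int) (k : Int) (out : List Int) : Decidable (Spec_last_k_digits n k out) := by unfold Spec_last_k_digits; infer_instance

-- ===== CLAIM (what is proved, stated in full; the proofs are below) =====
def Claim_equal_last_k_digits : Prop := ∀ (n : Int) (k : Int), Dom_last_k_digits n k → Pre_last_k_digits n k → Spec_last_k_digits n k (last_k_digits n k)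

-- ===== LEMMAS AND PROOFS =====

lemma digit_shift (v i : Nat) : v / 10 / 10 ^ i % 10 = v / 10 ^ (i + 1) % 10 := by
  rw [Nat.div_div_eq_div_mul, mul_comm, ← pow_succ]

-- A's loop: after folding over any list of length m the accumulated digits are the first m
-- little-endian decimal digits of the (nonnegative) running value
lemma loopA : ∀ (l : List Int) (acc : List Int) (vn : Nat),
    ((l.foldl
        (fun (st : List Int × Int) _ =>
          (st.1 ++ [PySem.Int.mod st.2 10], PySem.Int.floordiv st.2 10))
        (acc, (vn : Int)))).1
      = acc ++ (List.range l.length).map (fun i => ((vn / 10 ^ i % 10 : Nat) : Int)) := by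
  intro l
  induction l with
  | nil => simp
  | cons x xs ih =>
    intro acc vn
    simp only [List.foldl_cons]
    have hmod : PySem.Int.mod (vn : Int) 10 = ((vn % 10 : Nat) : Int) := by
      exact_mod_cast PySem.Int.mod_natCast vn 10
    have hdiv : PySem.Int.floordiv (vn : Int) 10 = ((vn / 10 : Nat) : Int) := by
      exact_mod_cast PySem.Int.floordiv_natCast vn 10
    rw [hmod, hdiv, ih]
    simp only [List.length_cons, List.range_succ_eq_map, List.map_cons, List.map_map]
    rw [List.append_assoc]
    congr 1
    simp only [pow_zero, Nat.div_one, List.cons_append, List.nil_append]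
    congr 1
    apply List.map_congr_left
    intro i _
    simp [digit_shift, Nat.succ_eq_add_one]

-- B's divide-and-conquer split yields the canonical little-endian digit list
lemma split_canon : ∀ (m : Nat), ∀ (vn : Nat), 1 ≤ m → vn < 10 ^ m →
    lkdSplit (vn : Int) (m : Int)
      = (List.range m).map (fun i => ((vn / 10 ^ i % 10 : Nat) : Int)) := by
  intro m
  induction m using Nat.strong_induction_on with
  | _ m ih =>
    intro vn hm hv
    rw [lkdSplit]
    by_cases h1 : m = 1
    · subst h1
      rw [if_pos (by norm_num)]
      simp only [List.range_succ_eq_map, List.range_zero, List.map_nil, List.map_cons,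
        pow_zero, Nat.div_one]
      have hv10 : vn < 10 := by simpa using hv
      simp [Nat.mod_eq_of_lt hv10]
    · have hm2 : 2 ≤ m := by omega
      rw [if_neg (by exact_mod_cast by omega : ¬ (m : Int) ≤ 1)]
      have hh : PySem.Int.floordiv (m : Int) 2 = ((m / 2 : Nat) : Int) := by
        exact_mod_cast PySem.Int.floordiv_natCast m 2
      set h := m / 2 with hhdef
      have hh1 : 1 ≤ h := by omega
      have hhm : h < m := by omega
      have hcastp : ((10 : Int) ^ h : Int) = ((10 ^ h : Nat) : Int) := by push_cast; ring
      have hmod : PySem.Int.mod (vn : Int) ((10 ^ h : Nat) : Int)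
          = ((vn % 10 ^ h : Nat) : Int) := PySem.Int.mod_natCast vn (10 ^ h)
      have hdiv : PySem.Int.floordiv (vn : Int) ((10 ^ h : Nat) : Int)
          = ((vn / 10 ^ h : Nat) : Int) := PySem.Int.floordiv_natCast vn (10 ^ h)
      simp only [hh, Int.toNat_natCast, hcastp, hmod, hdiv]
      have hsub : (m : Int) - (h : Int) = ((m - h : Nat) : Int) := by omega
      rw [hsub]
      have hlo : vn % 10 ^ h < 10 ^ h := Nat.mod_lt _ (by positivity)
      have hhi : vn / 10 ^ h < 10 ^ (m - h) := by
        rw [Nat.div_lt_iff_lt_mul (by positivity), ← pow_add,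
          show m - h + h = m by omega]
        exact hv
      rw [ih h hhm _ hh1 hlo, ih (m - h) (by omega) _ (by omega) hhi]
      have hrange : m = h + (m - h) := by omega
      conv_rhs => rw [hrange, List.range_add, List.map_append, List.map_map]
      congr 1
      · -- low half: (vn % 10^h) / 10^i % 10 = vn / 10^i % 10   for i < h
        apply List.map_congr_left
        intro i hi
        rw [List.mem_range] at hi
        congr 1
        have hsplit : (10 : Nat) ^ h = 10 ^ i * 10 ^ (h - i) := by
          rw [← pow_add]; congr 1; omega
        rw [hsplit, Nat.mod_mul_right_div_self,
          Nat.mod_mod_of_dvd _ (dvd_pow_self 10 (by omega : h - i ≠ 0))]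
      · -- high half: (vn / 10^h) / 10^j % 10 = vn / 10^(h+j) % 10
        apply List.map_congr_left
        intro j _
        simp only [Function.comp_apply]
        congr 2
        rw [Nat.div_div_eq_div_mul, ← pow_add]

-- ===== VERDICT (by name: the statement is the Claim_ definition above) =====
theorem last_k_digits_spec : Claim_equal_last_k_digits := by
  intro n k _ hpre
  unfold Spec_last_k_digits last_k_digits last_k_digits_alt
  obtain ⟨hk, hn⟩ := hpre
  by_cases hk0 : k = 0
  · subst hk0
    simp [PySem.List.pyRange]
  · rw [if_neg hk0]
    have hn0 : 0 ≤ n := hn.resolve_right hk0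
    set K := k.toNat with hKdef
    have hK1 : 1 ≤ K := by omega
    have hkK : k = (K : Int) := by omega
    have hmpos : (0 : Int) < (10 : Int) ^ K := by positivity
    set v := PySem.Int.powMod 2 n.toNat ((10 : Int) ^ K) with hvdef
    have hv0 : 0 ≤ v := PySem.Int.mod_nonneg _ hmpos
    have hvlt : v < (10 : Int) ^ K := PySem.Int.mod_lt _ hmpos
    set vn := v.toNat with hvndef
    have hvcast : v = (vn : Int) := by omega
    have hvn : vn < 10 ^ K := by
      have : ((10 : Int) ^ K) = ((10 ^ K : Nat) : Int) := by push_cast; ring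
      omega
    have hrange : (PySem.List.pyRange 0 k 1).length = K := by
      rw [hkK]
      have := PySem.List.pyRange_zero_natCast K
      simp [this]
    rw [hvcast, loopA, hrange, hkK, split_canon K vn hK1 hvn]
    simp
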